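-- pv_equiv track=rewrite | github.com/pavlin-policar/rosalind | gasm.py | generate_prefix_postfix_graph
-- ===== SOURCE A (Python) =====
-- from collections import defaultdict
--
-- def generate_prefix_postfix_graph(seqs, prefix_length):
--     num_nodes = len(seqs)
--
--     node_data = defaultdict(dict)
--     for idx, seq in enumerate(seqs):
--         node_data[idx]["prefix"] = seq[:prefix_length]
--         node_data[idx]["postfix"] = seq[-prefix_length:]
--
--     # We can speed up graph construction by remembering which nodes have the
--     # same prefix
--     prefix_cache = defaultdict(list)
--     for idx, seq in enumerate(seqs):
--         prefix_cache[node_data[idx]["prefix"]].append(idx)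
--
--     graph = defaultdict(list)
--     for i in range(num_nodes):
--         graph[i] = [j for j in prefix_cache[node_data[i]["postfix"]] if j != i]
--
--     return dict(graph)
-- ===== SOURCE B (Python) =====
-- def generate_prefix_postfix_graph(seqs, prefix_length):
--     # Direct pairwise scan: no node_data / prefix_cache index, one dict comprehension.
--     n = len(seqs)
--     return {
--         i: [j for j in range(n)
--             if j != i and seqs[j][:prefix_length] == seqs[i][-prefix_length:]]
--         for i in range(n)
--     }
-- ===== Notes on version B (the rewrite author's own statement) =====
-- stated objective: simpler
-- what changed: Replaces A's three passes (node_data dict of prefix/postfix, a prefix_cache index grouping nodes by prefix, then a lookup pass) with a single dict comprehension that, for each node, scans all nodes directly comparing prefix slices against its postfix slice.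
import Mathlib
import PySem

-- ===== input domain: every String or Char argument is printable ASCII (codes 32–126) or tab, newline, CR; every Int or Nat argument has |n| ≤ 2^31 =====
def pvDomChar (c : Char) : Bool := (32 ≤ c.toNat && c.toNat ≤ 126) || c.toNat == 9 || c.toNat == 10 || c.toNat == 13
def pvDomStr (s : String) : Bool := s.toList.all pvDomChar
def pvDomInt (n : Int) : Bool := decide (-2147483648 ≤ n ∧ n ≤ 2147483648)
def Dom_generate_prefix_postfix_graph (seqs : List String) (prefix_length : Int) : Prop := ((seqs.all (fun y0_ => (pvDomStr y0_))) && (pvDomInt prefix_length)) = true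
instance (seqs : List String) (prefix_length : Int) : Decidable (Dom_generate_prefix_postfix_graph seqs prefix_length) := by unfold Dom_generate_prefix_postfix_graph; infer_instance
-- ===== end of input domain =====

-- B replaces A's three passes (node_data slices, prefix_cache index, lookup pass) by one
-- direct pairwise scan; objective: simpler (same results, no index structures).

-- ===== PORT A =====
-- literal port of A; dicts are PySem.Dict, string slices on .toList (exact Python slice semantics)
def generate_prefix_postfix_graph (seqs : List String) (prefix_length : Int) : List (Int × List Int) :=
  let num_nodes := PySem.List.len seqs
  -- node_data = defaultdict(dict); node_data[idx]["prefix"] = seq[:prefix_length]; node_data[idx]["postfix"] = seq[-prefix_length:]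
  let node_data : PySem.Dict Int (PySem.Dict String (List Char)) :=
    (PySem.List.enumerate seqs).foldl
      (fun d p =>
        (d.modify p.1 PySem.Dict.empty
            (fun inner => inner.insert "prefix" (PySem.List.slice p.2.toList none (some prefix_length)))).modify
          p.1 PySem.Dict.empty
          (fun inner => inner.insert "postfix" (PySem.List.slice p.2.toList (some (-prefix_length)) none)))
      PySem.Dict.empty
  -- prefix_cache = defaultdict(list); prefix_cache[node_data[idx]["prefix"]].append(idx)
  let prefix_cache : PySem.Dict (List Char) (List Int) :=
    (PySem.List.enumerate seqs).foldl
      (fun d p =>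
        d.modify ((node_data.getD p.1 PySem.Dict.empty).getD "prefix" []) [] (fun l => l ++ [p.1]))
      PySem.Dict.empty
  -- graph[i] = [j for j in prefix_cache[node_data[i]["postfix"]] if j != i]
  let graph : PySem.Dict Int (List Int) :=
    (PySem.List.pyRange 0 num_nodes).foldl
      (fun g i =>
        g.insert i
          ((prefix_cache.getD ((node_data.getD i PySem.Dict.empty).getD "postfix" []) []).filter
            (fun j => decide (j ≠ i))))
      PySem.Dict.empty
  graph.items

-- ===== PORT B =====
-- literal port of Source B: dict comprehension over range(n); seqs[j] via pyGetD (index from range(n) is in range)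
def generate_prefix_postfix_graph_alt (seqs : List String) (prefix_length : Int) : List (Int × List Int) :=
  let n := PySem.List.len seqs
  (PySem.List.pyRange 0 n).map
    (fun i =>
      (i, (PySem.List.pyRange 0 n).filter
            (fun j => decide (j ≠ i) &&
              (PySem.List.slice (PySem.List.pyGetD seqs j "").toList none (some prefix_length) ==
                PySem.List.slice (PySem.List.pyGetD seqs i "").toList (some (-prefix_length)) none))))

-- ===== PRECONDITION & SPEC =====
def Spec_generate_prefix_postfix_graph (seqs : List String) (prefix_length : Int) (out : List (Int × List Int)) : Prop := out = generate_prefix_postfix_graph_alt seqs prefix_length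
instance (seqs : List String) (prefix_length : Int) (out : List (Int × List Int)) : Decidable (Spec_generate_prefix_postfix_graph seqs prefix_length out) := by unfold Spec_generate_prefix_postfix_graph; infer_instance

-- ===== CLAIM (what is proved, stated in full; the proofs are below) =====
def Claim_equal_generate_prefix_postfix_graph : Prop := ∀ (seqs : List String) (prefix_length : Int), Dom_generate_prefix_postfix_graph seqs prefix_length → Spec_generate_prefix_postfix_graph seqs prefix_length (generate_prefix_postfix_graph seqs prefix_length)

-- ===== LEMMAS AND PROOFS =====

-- the inner dict A stores for a sequence x
def pvInner (prefix_length : Int) (x : String) : PySem.Dict String (List Char) :=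
  (PySem.Dict.empty.insert "prefix" (PySem.List.slice x.toList none (some prefix_length))).insert
    "postfix" (PySem.List.slice x.toList (some (-prefix_length)) none)

-- A's node_data-building step
def pvStep (prefix_length : Int) (d : PySem.Dict Int (PySem.Dict String (List Char)))
    (p : Int × String) : PySem.Dict Int (PySem.Dict String (List Char)) :=
  (d.modify p.1 PySem.Dict.empty
      (fun inner => inner.insert "prefix" (PySem.List.slice p.2.toList none (some prefix_length)))).modify
    p.1 PySem.Dict.empty
    (fun inner => inner.insert "postfix" (PySem.List.slice p.2.toList (some (-prefix_length)) none))

lemma pvFold_getD_of_not_mem (prefix_length : Int) (l : List (Int × String))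
    (d : PySem.Dict Int (PySem.Dict String (List Char))) (i : Int)
    (h : ∀ p ∈ l, p.1 ≠ i) :
    (l.foldl (pvStep prefix_length) d).getD i PySem.Dict.empty = d.getD i PySem.Dict.empty := by
  induction l generalizing d with
  | nil => rfl
  | cons q t ih =>
    simp only [List.foldl_cons]
    rw [ih _ (fun p hp => h p (List.mem_cons_of_mem _ hp))]
    have hq : i ≠ q.1 := (h q (List.mem_cons_self)).symm.imp id
    simp [pvStep, PySem.Dict.getD_modify, hq]

lemma pvFold_getD_mem (prefix_length : Int) (l : List (Int × String))
    (d : PySem.Dict Int (PySem.Dict String (List Char))) (i : Int) (x : String)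
    (hmem : (i, x) ∈ l) (hnd : (l.map Prod.fst).Nodup)
    (hd : d.getD i PySem.Dict.empty = PySem.Dict.empty) :
    (l.foldl (pvStep prefix_length) d).getD i PySem.Dict.empty = pvInner prefix_length x := by
  induction l generalizing d with
  | nil => cases hmem
  | cons q t ih =>
    simp only [List.map_cons, List.nodup_cons] at hnd
    by_cases hq : q.1 = i
    · -- the head writes key i; i never occurs later
      have hnt : i ∉ t.map Prod.fst := hq ▸ hnd.1
      have hx : q = (i, x) := by
        rcases List.mem_cons.mp hmem with h1 | h2
        · exact h1.symm
        · exact absurd (List.mem_map_of_mem (f := Prod.fst) h2) hnt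
      subst hx
      simp only [List.foldl_cons]
      rw [pvFold_getD_of_not_mem _ _ _ _
        (fun p hp he => hnt (by rw [← he]; exact List.mem_map_of_mem (f := Prod.fst) hp))]
      simp [pvStep, PySem.Dict.getD_modify_self, hd, pvInner]
    · have hmem' : (i, x) ∈ t := by
        rcases List.mem_cons.mp hmem with h1 | h2
        · exact absurd (congrArg Prod.fst h1.symm) hq
        · exact h2
      simp only [List.foldl_cons]
      refine ih _ hmem' hnd.2 ?_
      simpa [pvStep, PySem.Dict.getD_modify, Ne.symm hq] using hd

-- after the whole loop: node_data[i] for i in range(len(seqs))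
lemma pvNodeData_getD (prefix_length : Int) (seqs : List String) (i : Int)
    (hi : i ∈ PySem.List.pyRange 0 (PySem.List.len seqs)) :
    ((PySem.List.enumerate seqs).foldl (pvStep prefix_length) PySem.Dict.empty).getD i PySem.Dict.empty
      = pvInner prefix_length (PySem.List.pyGetD seqs i "") := by
  refine pvFold_getD_mem _ _ _ _ _ ?_ ?_ (by simp)
  · rw [PySem.List.enumerate_eq_map_pyRange seqs ""]
    exact List.mem_map_of_mem hi
  · rw [PySem.List.enumerate_eq_map_pyRange seqs ""]
    simp only [List.map_map]
    have : ((fun j => (j, PySem.List.pyGetD seqs j "")) · |> Prod.fst) = id := rfl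
    simp only [Function.comp_def, List.map_id']
    exact (PySem.List.pairwise_lt_pyRange_one 0 (PySem.List.len seqs)).nodup

lemma pvRange_nodup (a b : Int) : (PySem.List.pyRange a b).Nodup :=
  (PySem.List.pairwise_lt_pyRange_one a b).nodup

lemma pvInner_pre (prefix_length : Int) (x : String) :
    (pvInner prefix_length x).getD "prefix" [] = PySem.List.slice x.toList none (some prefix_length) := by
  unfold pvInner
  rw [PySem.Dict.getD_insert_of_ne _ _ _ (by decide), PySem.Dict.getD_insert_self]

lemma pvInner_post (prefix_length : Int) (x : String) :
    (pvInner prefix_length x).getD "postfix" [] = PySem.List.slice x.toList (some (-prefix_length)) none := by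
  unfold pvInner
  rw [PySem.Dict.getD_insert_self]

lemma pvMain (seqs : List String) (prefix_length : Int) :
    generate_prefix_postfix_graph seqs prefix_length = generate_prefix_postfix_graph_alt seqs prefix_length := by
  -- zeta-expand A (definitional) with its node_data step named pvStep
  have hA : generate_prefix_postfix_graph seqs prefix_length =
      ((PySem.List.pyRange 0 (PySem.List.len seqs)).foldl
        (fun g i =>
          g.insert i
            ((((PySem.List.enumerate seqs).foldl
                  (fun d p =>
                    d.modify ((((PySem.List.enumerate seqs).foldl (pvStep prefix_length)
                          PySem.Dict.empty).getD p.1 PySem.Dict.empty).getD "prefix" [])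
                      [] (fun l => l ++ [p.1]))
                  PySem.Dict.empty).getD
                ((((PySem.List.enumerate seqs).foldl (pvStep prefix_length)
                      PySem.Dict.empty).getD i PySem.Dict.empty).getD "postfix" [])
                []).filter (fun j => decide (j ≠ i))))
        PySem.Dict.empty).items := rfl
  have hB : generate_prefix_postfix_graph_alt seqs prefix_length =
      (PySem.List.pyRange 0 (PySem.List.len seqs)).map
        (fun i =>
          (i, (PySem.List.pyRange 0 (PySem.List.len seqs)).filter
                (fun j => decide (j ≠ i) &&
                  (PySem.List.slice (PySem.List.pyGetD seqs j "").toList none (some prefix_length) ==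
                    PySem.List.slice (PySem.List.pyGetD seqs i "").toList (some (-prefix_length)) none)))) := rfl
  rw [hA, hB]
  -- the graph-building loop inserts the fresh distinct keys 0,1,…,n-1 in order
  rw [PySem.Dict.items_foldl_insert_fresh _ (fun i => i) _ _
        (fun a _ => PySem.Dict.contains_empty a)
        (by simpa using pvRange_nodup 0 (PySem.List.len seqs))]
  rw [show (PySem.Dict.empty : PySem.Dict Int (List Int)).items = [] from rfl, List.nil_append]
  apply List.map_congr_left
  intro i hi
  refine Prod.ext rfl ?_
  -- the prefix_cache loop is the grouping loop of getD_foldl_modify_append, over enumerate re-keyed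
  have hcache :
      (PySem.List.enumerate seqs).foldl
          (fun d p =>
            d.modify ((((PySem.List.enumerate seqs).foldl (pvStep prefix_length)
                  PySem.Dict.empty).getD p.1 PySem.Dict.empty).getD "prefix" [])
              [] (fun l => l ++ [p.1]))
          PySem.Dict.empty =
        ((PySem.List.enumerate seqs).map
            (fun p => ((((PySem.List.enumerate seqs).foldl (pvStep prefix_length)
                  PySem.Dict.empty).getD p.1 PySem.Dict.empty).getD "prefix" [], p.1))).foldl
          (fun d q => d.modify q.1 [] (fun l => l ++ [q.2])) PySem.Dict.empty := by
    rw [List.foldl_map]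
  rw [hcache, PySem.Dict.getD_foldl_modify_append, PySem.Dict.getD_empty, List.nil_append]
  -- rewrite enumerate as a map over range, and push the filters through the maps
  rw [PySem.List.enumerate_eq_map_pyRange seqs ""]
  rw [List.filter_map, List.filter_filter, List.filter_map, List.map_map,
    List.filter_map, List.map_map]
  have hpost : ((((PySem.List.pyRange 0 (PySem.List.len seqs)).map
        (fun j => (j, PySem.List.pyGetD seqs j ""))).foldl (pvStep prefix_length)
        PySem.Dict.empty).getD i PySem.Dict.empty).getD "postfix" [] =
      PySem.List.slice (PySem.List.pyGetD seqs i "").toList (some (-prefix_length)) none := by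
    rw [← PySem.List.enumerate_eq_map_pyRange seqs "", pvNodeData_getD prefix_length seqs i hi,
      pvInner_post]
  have hid : (((fun (x : List Char × Int) => x.2) ∘ (fun p : Int × String =>
        (((((PySem.List.pyRange 0 (PySem.List.len seqs)).map
              (fun j => (j, PySem.List.pyGetD seqs j ""))).foldl (pvStep prefix_length)
              PySem.Dict.empty).getD p.1 PySem.Dict.empty).getD "prefix" [], p.1))) ∘
        (fun j => (j, PySem.List.pyGetD seqs j ""))) = fun (j : Int) => j := rfl
  rw [hid, List.map_id']
  apply List.filter_congr
  intro j hj
  have hpre : ((((PySem.List.pyRange 0 (PySem.List.len seqs)).map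
        (fun j => (j, PySem.List.pyGetD seqs j ""))).foldl (pvStep prefix_length)
        PySem.Dict.empty).getD j PySem.Dict.empty).getD "prefix" [] =
      PySem.List.slice (PySem.List.pyGetD seqs j "").toList none (some prefix_length) := by
    rw [← PySem.List.enumerate_eq_map_pyRange seqs "", pvNodeData_getD prefix_length seqs j hj,
      pvInner_pre]
  simp only [Function.comp_apply, hpost, hpre]

-- ===== VERDICT (by name: the statement is the Claim_ definition above) =====
theorem generate_prefix_postfix_graph_spec : Claim_equal_generate_prefix_postfix_graph := by
  intro seqs prefix_length _
  exact pvMain seqs prefix_length
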